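-- pv_equiv track=rewrite | github.com/vitos63/test_task_rumikon | algebraic_calculator/operations_with_letters.py | convert_expression
-- ===== SOURCE A (Python) =====
-- def convert_expression(expression: str) -> dict:
--     """Функция, которая конвертирует выражение из строки в словарь, для дальнейшего упрощения"""
--     expression_as_dict = {}
--     cur_digit = ""
--     cur_letters = ""
--     negative = True if expression[0] == "-" else False
--
--     for symbol in expression:
--         if symbol.isdigit():
--             cur_digit += symbol
--
--         elif symbol.isalpha():
--             cur_letters += symbol
--
--         elif symbol == "*" or symbol == " ":
--             continue
--
--         elif symbol == "-":
--             negative = True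
--
--         else:
--             if not cur_digit:
--                 cur_digit = "1"
--             if cur_letters:
--                 cur_letters = "".join(sorted(cur_letters))
--                 if negative:
--                     expression_as_dict[cur_letters] = expression_as_dict.get(cur_letters, 0) - int(cur_digit)
--
--                 else:
--                     expression_as_dict[cur_letters] = expression_as_dict.get(cur_letters, 0) + int(cur_digit)
--
--             else:
--                 if negative:
--                     expression_as_dict["digits"] = expression_as_dict.get("digits", 0) - int(cur_digit)
--
--                 else:
--                     expression_as_dict["digits"] = expression_as_dict.get("digits", 0) + int(cur_digit)
--
--             cur_letters = cur_digit = ""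
--             negative = False
--
--     if cur_letters:
--         if not cur_digit:
--             cur_digit = "1"
--         cur_letters = "".join(sorted(cur_letters))
--         if negative:
--             expression_as_dict[cur_letters] = expression_as_dict.get(cur_letters, 0) - int(cur_digit)
--
--         else:
--             expression_as_dict[cur_letters] = expression_as_dict.get(cur_letters, 0) + int(cur_digit)
--
--     elif cur_digit:
--         if negative:
--             expression_as_dict["digits"] = expression_as_dict.get("digits", 0) - int(cur_digit)
--
--         else:
--             expression_as_dict["digits"] = expression_as_dict.get("digits", 0) + int(cur_digit)
--
--     return expression_as_dict
-- ===== SOURCE B (Python) =====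
-- def convert_expression(expression: str) -> dict:
--     """Split the expression at operator characters, then aggregate each term segment at once."""
--     body, tail = _split_terms(expression)
--     result = {}
--     for seg in body:
--         _add_term(result, seg)
--     if any(c.isdigit() or c.isalpha() for c in tail):
--         _add_term(result, tail)
--     return result
--
--
-- def _split_terms(expression):
--     """Cut the expression at every char that cannot belong to a term; return (closed segments, trailing segment)."""
--     body, cur = [], ""
--     for c in expression:
--         if c.isdigit() or c.isalpha() or c in "* -":
--             cur += c
--         else:
--             body.append(cur)
--             cur = ""
--     return body, cur
--
--
-- def _add_term(result, seg):
--     digits = "".join(c for c in seg if c.isdigit())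
--     letters = "".join(sorted(c for c in seg if c.isalpha()))
--     key = letters if letters else "digits"
--     sign = -1 if "-" in seg else 1
--     result[key] = result.get(key, 0) + sign * int(digits if digits else "1")
-- ===== Notes on version B (the rewrite author's own statement) =====
-- stated objective: alternative
-- what changed: A is a one-pass state machine carrying four mutable registers (dict, digit buffer, letter buffer, sign flag) with a duplicated flush block; B first cuts the string into term segments at operator characters and then aggregates each segment in one shot (filter digits, filter+sort letters, sign = '-' in segment, signed add), handling the trailing segment once.
import Mathlib
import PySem

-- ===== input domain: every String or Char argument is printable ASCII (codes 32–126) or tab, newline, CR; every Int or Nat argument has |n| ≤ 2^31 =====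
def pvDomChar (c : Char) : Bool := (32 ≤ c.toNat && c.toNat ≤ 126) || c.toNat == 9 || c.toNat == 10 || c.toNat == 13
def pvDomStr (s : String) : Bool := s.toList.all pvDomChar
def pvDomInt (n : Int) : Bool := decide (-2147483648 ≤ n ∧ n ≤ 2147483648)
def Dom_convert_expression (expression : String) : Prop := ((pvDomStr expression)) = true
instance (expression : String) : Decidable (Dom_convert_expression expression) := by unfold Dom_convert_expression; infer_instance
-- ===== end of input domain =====

-- B replaces A's four-register character state machine by split-into-term-segments followed by
-- per-segment aggregation (objective: alternative decomposition, same cost).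

-- ===== PORT A =====
-- the else-branch of A's loop body: flush the current term into the dict
def aFlush (d : PySem.Dict String Int) (cd cl : List Char) (neg : Bool) : PySem.Dict String Int :=
  let cd := if cd = [] then ['1'] else cd
  -- int(cur_digit): cd is always a nonempty string of decimal digits here, so int() never raises
  let n : Int := (PySem.Int.ofChars? cd).getD 0
  if cl ≠ [] then
    let key := String.ofList (PySem.List.sorted cl (fun c => c) false)
    if neg then d.insert key (d.getD key 0 - n) else d.insert key (d.getD key 0 + n)
  else
    if neg then d.insert "digits" (d.getD "digits" 0 - n) else d.insert "digits" (d.getD "digits" 0 + n)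

-- one iteration of A's for-loop; state = (dict, cur_digit, cur_letters, negative)
def aStep (s : PySem.Dict String Int × List Char × List Char × Bool) (c : Char) :
    PySem.Dict String Int × List Char × List Char × Bool :=
  let (d, cd, cl, neg) := s
  if PySem.Chars.isdigit c then (d, cd ++ [c], cl, neg)
  else if PySem.Chars.isalpha c then (d, cd, cl ++ [c], neg)
  else if c = '*' ∨ c = ' ' then (d, cd, cl, neg)
  else if c = '-' then (d, cd, cl, true)
  else (aFlush d cd cl neg, ([] : List Char), ([] : List Char), false)

-- A's code after the loop
def aFinish (d : PySem.Dict String Int) (cd cl : List Char) (neg : Bool) : PySem.Dict String Int :=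
  if cl ≠ [] then
    let cd := if cd = [] then ['1'] else cd
    let n : Int := (PySem.Int.ofChars? cd).getD 0
    let key := String.ofList (PySem.List.sorted cl (fun c => c) false)
    if neg then d.insert key (d.getD key 0 - n) else d.insert key (d.getD key 0 + n)
  else if cd ≠ [] then
    let n : Int := (PySem.Int.ofChars? cd).getD 0
    if neg then d.insert "digits" (d.getD "digits" 0 - n) else d.insert "digits" (d.getD "digits" 0 + n)
  else d

-- A's body given expression[0] (none = IndexError, excluded by Pre_)
def aTop (expression : String) : Option Char → List (String × Int)
  | none => []
  | some c0 =>
    let negative : Bool := c0 == '-'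
    let st := expression.toList.foldl aStep (PySem.Dict.empty, [], [], negative)
    (aFinish st.1 st.2.1 st.2.2.1 st.2.2.2).items

def convert_expression (expression : String) : List (String × Int) :=
  aTop expression (PySem.Str.pyGet? expression 0)

-- ===== PORT B =====
-- c.isdigit() or c.isalpha() or c in "* -"
def bTermChar (c : Char) : Bool :=
  PySem.Chars.isdigit c || PySem.Chars.isalpha c || c = '*' || c = ' ' || c = '-'

-- _split_terms: closed segments plus the trailing segment
def bSplitTerms (l : List Char) : List (List Char) × List Char :=
  l.foldl (fun (p : List (List Char) × List Char) c =>
    if bTermChar c then (p.1, p.2 ++ [c]) else (p.1 ++ [p.2], [])) ([], [])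

-- _add_term: aggregate one segment into the dict
def bAddTerm (result : PySem.Dict String Int) (seg : List Char) : PySem.Dict String Int :=
  let digits := seg.filter PySem.Chars.isdigit
  let letters := PySem.List.sorted (seg.filter PySem.Chars.isalpha) (fun c => c) false
  let key := if letters ≠ [] then String.ofList letters else "digits"
  let sign : Int := if seg.any (· = '-') then -1 else 1
  result.insert key (result.getD key 0 + sign * (PySem.Int.ofChars? (if digits ≠ [] then digits else ['1'])).getD 0)

def convert_expression_alt (expression : String) : List (String × Int) :=
  let p := bSplitTerms expression.toList
  let result := p.1.foldl bAddTerm PySem.Dict.empty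
  (if p.2.any (fun c => PySem.Chars.isdigit c || PySem.Chars.isalpha c) then bAddTerm result p.2
   else result).items

-- ===== PRECONDITION & SPEC =====
-- Pre_ excludes only the empty string, on which A raises IndexError (expression[0]).
def Pre_convert_expression (expression : String) : Prop := expression.toList ≠ []
instance (expression : String) : Decidable (Pre_convert_expression expression) := by
  unfold Pre_convert_expression; infer_instance
def pvWitness_convert_expression : String := "2a+3b-a"

def Spec_convert_expression (expression : String) (out : List (String × Int)) : Prop :=
  out = convert_expression_alt expression
instance (expression : String) (out : List (String × Int)) : Decidable (Spec_convert_expression expression out) := by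
  unfold Spec_convert_expression; infer_instance

-- ===== CLAIM (what is proved, stated in full; the proofs are below) =====
def Claim_equal_convert_expression : Prop := ∀ (expression : String), Dom_convert_expression expression → Pre_convert_expression expression → Spec_convert_expression expression (convert_expression expression)

-- ===== LEMMAS AND PROOFS =====

-- recursive specification of B's splitter
def splitRec : List Char → List Char → List (List Char) × List Char
  | [], cur => ([], cur)
  | c :: t, cur =>
    if bTermChar c then splitRec t (cur ++ [c])
    else ((cur :: (splitRec t []).1), (splitRec t []).2)

theorem splitRec_fold (l : List Char) : ∀ (segs : List (List Char)) (cur : List Char),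
    l.foldl (fun (p : List (List Char) × List Char) c =>
      if bTermChar c then (p.1, p.2 ++ [c]) else (p.1 ++ [p.2], [])) (segs, cur)
    = (segs ++ (splitRec l cur).1, (splitRec l cur).2) := by
  induction l with
  | nil => intro segs cur; simp [splitRec]
  | cons c t ih =>
    intro segs cur
    by_cases h : bTermChar c = true
    · simp [splitRec, h, ih]
    · simp [splitRec, h, ih]

-- process (body, tail) segments starting from dict d
def bRun (p : List (List Char) × List Char) (d : PySem.Dict String Int) : PySem.Dict String Int :=
  let r := p.1.foldl bAddTerm d
  if p.2.any (fun c => PySem.Chars.isdigit c || PySem.Chars.isalpha c) then bAddTerm r p.2 else r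

-- ASCII character-class facts about the loops' tests
theorem digit_not_alpha (c : Char) (h : PySem.Chars.isdigit c = true) :
    PySem.Chars.isalpha c = false := by
  simp only [PySem.Chars.isdigit, Bool.and_eq_true, decide_eq_true_eq, Char.le_def,
    UInt32.le_iff_toBitVec_le, BitVec.le_def] at h
  simp only [PySem.Chars.isalpha, PySem.Chars.isupper, PySem.Chars.islower,
    Bool.or_eq_false_iff, Bool.and_eq_false_iff, decide_eq_false_iff_not, Char.le_def,
    UInt32.le_iff_toBitVec_le, BitVec.le_def]
  have e0 : '0'.val.toBitVec.toNat = 48 := rfl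
  have e9 : '9'.val.toBitVec.toNat = 57 := rfl
  have eA : 'A'.val.toBitVec.toNat = 65 := rfl
  have eZ : 'Z'.val.toBitVec.toNat = 90 := rfl
  have ea : 'a'.val.toBitVec.toNat = 97 := rfl
  have ez : 'z'.val.toBitVec.toNat = 122 := rfl
  rw [e0, e9] at h
  rw [eA, eZ, ea, ez]
  omega

theorem digit_ne_dash (c : Char) (h : PySem.Chars.isdigit c = true) : c ≠ '-' := by
  rintro rfl
  exact absurd h (by decide)

theorem alpha_ne_dash (c : Char) (h : PySem.Chars.isalpha c = true) : c ≠ '-' := by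
  rintro rfl
  exact absurd h (by decide)

-- the inline flush of A equals B's per-segment aggregation
theorem flush_eq (d : PySem.Dict String Int) (p : List Char) :
    aFlush d (p.filter PySem.Chars.isdigit) (p.filter PySem.Chars.isalpha) (p.any (· = '-'))
    = bAddTerm d p := by
  unfold aFlush bAddTerm
  by_cases hcl : p.filter PySem.Chars.isalpha = [] <;>
  by_cases hcd : p.filter PySem.Chars.isdigit = [] <;>
  by_cases hneg : p.any (· = '-') = true <;>
    simp [hcl, hcd, hneg, PySem.List.sorted_eq_nil_iff, sub_eq_add_neg, neg_one_mul]

-- A's finish equals B's conditional treatment of the trailing segment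
theorem finish_eq (d : PySem.Dict String Int) (p : List Char) :
    aFinish d (p.filter PySem.Chars.isdigit) (p.filter PySem.Chars.isalpha) (p.any (· = '-'))
    = if p.any (fun c => PySem.Chars.isdigit c || PySem.Chars.isalpha c) then bAddTerm d p else d := by
  unfold aFinish bAddTerm
  by_cases hcl : p.filter PySem.Chars.isalpha = []
  · by_cases hcd : p.filter PySem.Chars.isdigit = []
    · have hany : p.any (fun c => PySem.Chars.isdigit c || PySem.Chars.isalpha c) = false := by
        simp only [List.any_eq_false]
        intro c hc
        have h1 := List.filter_eq_nil_iff.mp hcd c hc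
        have h2 := List.filter_eq_nil_iff.mp hcl c hc
        simp only [Bool.not_eq_true] at h1 h2
        simp [h1, h2]
      simp [hcl, hcd, hany]
    · have hany : p.any (fun c => PySem.Chars.isdigit c || PySem.Chars.isalpha c) = true := by
        rw [List.any_eq_true]
        obtain ⟨c, hc⟩ := List.exists_mem_of_ne_nil _ hcd
        exact ⟨c, List.mem_of_mem_filter hc, by simp [List.of_mem_filter hc]⟩
      by_cases hneg : p.any (· = '-') = true <;>
        simp [hcl, hcd, hany, hneg, PySem.List.sorted_eq_nil_iff, sub_eq_add_neg, neg_one_mul]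
  · have hany : p.any (fun c => PySem.Chars.isdigit c || PySem.Chars.isalpha c) = true := by
      rw [List.any_eq_true]
      obtain ⟨c, hc⟩ := List.exists_mem_of_ne_nil _ hcl
      exact ⟨c, List.mem_of_mem_filter hc, by simp [List.of_mem_filter hc]⟩
    by_cases hcd : p.filter PySem.Chars.isdigit = [] <;>
    by_cases hneg : p.any (· = '-') = true <;>
      simp [hcl, hcd, hany, hneg, PySem.List.sorted_eq_nil_iff, sub_eq_add_neg, neg_one_mul]

def aFinishSt (st : PySem.Dict String Int × List Char × List Char × Bool) : PySem.Dict String Int :=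
  aFinish st.1 st.2.1 st.2.2.1 st.2.2.2

-- main invariant: A's loop resumed from the state accumulated over the raw prefix p of the current
-- term equals B's split-then-aggregate on the remaining characters
theorem main_inv (l : List Char) : ∀ (d : PySem.Dict String Int) (p : List Char),
    aFinishSt (l.foldl aStep (d, p.filter PySem.Chars.isdigit, p.filter PySem.Chars.isalpha,
        p.any (· = '-')))
    = bRun (splitRec l p) d := by
  induction l with
  | nil =>
    intro d p
    simp only [List.foldl_nil, splitRec, aFinishSt, bRun]
    exact finish_eq d p
  | cons c t ih =>
    intro d p
    rw [List.foldl_cons]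
    by_cases hd : PySem.Chars.isdigit c = true
    · have hna := digit_not_alpha c hd
      have hnd := digit_ne_dash c hd
      have hterm : bTermChar c = true := by simp [bTermChar, hd]
      have hstep : aStep (d, p.filter PySem.Chars.isdigit, p.filter PySem.Chars.isalpha,
          p.any (· = '-')) c
          = (d, (p ++ [c]).filter PySem.Chars.isdigit, (p ++ [c]).filter PySem.Chars.isalpha,
             (p ++ [c]).any (· = '-')) := by
        simp [aStep, hd, hna, hnd, List.filter_append]
      rw [hstep, ih d (p ++ [c])]
      simp [splitRec, hterm]
    · by_cases ha : PySem.Chars.isalpha c = true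
      · have hnd := alpha_ne_dash c ha
        have hterm : bTermChar c = true := by simp [bTermChar, ha]
        have hstep : aStep (d, p.filter PySem.Chars.isdigit, p.filter PySem.Chars.isalpha,
            p.any (· = '-')) c
            = (d, (p ++ [c]).filter PySem.Chars.isdigit, (p ++ [c]).filter PySem.Chars.isalpha,
               (p ++ [c]).any (· = '-')) := by
          simp [aStep, hd, ha, hnd, List.filter_append]
        rw [hstep, ih d (p ++ [c])]
        simp [splitRec, hterm]
      · by_cases hss : c = '*' ∨ c = ' '
        · have hterm : bTermChar c = true := by
            rcases hss with h | h <;> subst h <;> decide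
          have hstep : aStep (d, p.filter PySem.Chars.isdigit, p.filter PySem.Chars.isalpha,
              p.any (· = '-')) c
              = (d, (p ++ [c]).filter PySem.Chars.isdigit, (p ++ [c]).filter PySem.Chars.isalpha,
                 (p ++ [c]).any (· = '-')) := by
            rcases hss with h | h <;> subst h <;>
              simp [aStep, List.filter_append,
                show PySem.Chars.isdigit '*' = false from by decide,
                show PySem.Chars.isalpha '*' = false from by decide,
                show PySem.Chars.isdigit ' ' = false from by decide,
                show PySem.Chars.isalpha ' ' = false from by decide]
          rw [hstep, ih d (p ++ [c])]
          simp [splitRec, hterm]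
        · by_cases hdash : c = '-'
          · subst hdash
            have hterm : bTermChar '-' = true := by decide
            have hstep : aStep (d, p.filter PySem.Chars.isdigit, p.filter PySem.Chars.isalpha,
                p.any (· = '-')) '-'
                = (d, (p ++ ['-']).filter PySem.Chars.isdigit,
                   (p ++ ['-']).filter PySem.Chars.isalpha, (p ++ ['-']).any (· = '-')) := by
              simp [aStep, List.filter_append,
                show PySem.Chars.isdigit '-' = false from by decide,
                show PySem.Chars.isalpha '-' = false from by decide]
            rw [hstep, ih d (p ++ ['-'])]
            simp [splitRec, hterm]
          · push_neg at hss
            have hterm : bTermChar c = false := by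
              simp [bTermChar, hd, ha, hdash, hss.1, hss.2]
            have hstep : aStep (d, p.filter PySem.Chars.isdigit, p.filter PySem.Chars.isalpha,
                p.any (· = '-')) c
                = (bAddTerm d p, ([] : List Char), ([] : List Char), false) := by
              simp [aStep, hd, ha, hss.1, hss.2, hdash, ← flush_eq d p]
            rw [hstep]
            have h0 := ih (bAddTerm d p) []
            simp only [List.filter_nil, List.any_nil] at h0
            rw [h0]
            simp [splitRec, hterm, bRun]

-- ===== VERDICT (by name: the statement is the Claim_ definition above) =====
theorem convert_expression_spec : Claim_equal_convert_expression := by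
  intro e _ hpre
  unfold Spec_convert_expression
  obtain ⟨c0, t, hl⟩ := List.exists_cons_of_ne_nil hpre
  have hB : convert_expression_alt e = (bRun (splitRec e.toList []) PySem.Dict.empty).items := by
    unfold convert_expression_alt bSplitTerms bRun
    rw [splitRec_fold]
    simp
  have hget : PySem.Str.pyGet? e 0 = some c0 := by
    simp [PySem.Str.pyGet?_eq, PySem.Chars.pyGet?_eq_listPyGet?, hl, PySem.List.pyGet?,
      PySem.List.pyIdx?]
  rw [hB]
  unfold convert_expression
  rw [hget]
  simp only [aTop]
  by_cases hc0 : c0 = '-'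
  · subst hc0
    have hinit : (('-' : Char) == '-') = true := by decide
    rw [hinit, hl, List.foldl_cons]
    have hstep : aStep (PySem.Dict.empty, ([] : List Char), ([] : List Char), true) '-'
        = (PySem.Dict.empty, (['-'] : List Char).filter PySem.Chars.isdigit,
           (['-'] : List Char).filter PySem.Chars.isalpha,
           (['-'] : List Char).any (· = '-')) := by decide
    rw [hstep]
    have h0 := main_inv t PySem.Dict.empty ['-']
    simp only [aFinishSt] at h0
    rw [h0]
    have hsp : splitRec ('-' :: t) [] = splitRec t ['-'] := by
      simp [splitRec, show bTermChar '-' = true from by decide]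
    rw [hsp]
  · have hinit : ((c0 : Char) == '-') = false := by simp [hc0]
    rw [hinit, hl]
    have h0 := main_inv (c0 :: t) PySem.Dict.empty []
    simp only [aFinishSt, List.filter_nil, List.any_nil] at h0
    rw [h0]
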